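-- pv_equiv track=rewrite | github.com/kangmoonsu/DSA-study | 250808/Sum and Prime Number Determination Using Functions/use-functions-to-determine-sums-and-decimals.py | primeAndSum
-- ===== SOURCE A (Python) =====
-- def primeAndSum(a,b):
--     answer = 0
--     for i in range(a,b+1):
--         cnt = 0
--         for j in range(1,i+1):
--             if i % j == 0:
--                 cnt+=1
--         if cnt <= 2:
--             if ((i // 10) + (i % 10)) % 2 == 0:
--                 answer+=1
--
--     return answer
-- ===== SOURCE B (Python) =====
-- def primeAndSum(a, b):
--     # Decide each i by trial division up to sqrt(i) instead of counting all its divisors.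
--     answer = 0
--     for i in range(a, b + 1):
--         keep = True
--         if i >= 2:
--             j = 2
--             while j * j <= i:
--                 if i % j == 0:
--                     keep = False
--                     break
--                 j += 1
--         if keep and ((i // 10) + (i % 10)) % 2 == 0:
--             answer += 1
--     return answer
-- ===== Notes on version B (the rewrite author's own statement) =====
-- stated objective: alternative
-- what changed: A counts all divisors of each i with a full scan j=1..i and tests cnt<=2; B decides the same keep-condition by trial division up to sqrt(i) with early exit (nonpositive i and 1 kept as in A), same digit-sum parity filter.
import Mathlib
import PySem

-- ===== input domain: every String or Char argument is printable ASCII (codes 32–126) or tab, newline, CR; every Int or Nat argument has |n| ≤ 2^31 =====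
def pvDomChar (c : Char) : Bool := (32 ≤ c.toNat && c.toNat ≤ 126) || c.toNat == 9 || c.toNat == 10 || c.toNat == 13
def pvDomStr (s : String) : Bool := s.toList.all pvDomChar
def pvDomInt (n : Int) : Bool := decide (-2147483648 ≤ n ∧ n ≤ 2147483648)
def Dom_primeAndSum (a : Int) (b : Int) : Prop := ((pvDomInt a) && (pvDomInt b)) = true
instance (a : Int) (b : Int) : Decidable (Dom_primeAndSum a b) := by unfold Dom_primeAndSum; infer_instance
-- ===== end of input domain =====

-- B replaces A's full divisor count (j = 1..i) by trial division up to sqrt(i) with early exit; same result.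

-- ===== PORT A =====
-- A's inner loop: cnt = number of j in 1..i with i % j == 0
def pvCntDivs (i : Int) : Int :=
  (PySem.List.pyRange 1 (i + 1) 1).foldl
    (fun cnt j => if PySem.Int.mod i j = 0 then cnt + 1 else cnt) 0

def primeAndSum (a : Int) (b : Int) : Int :=
  (PySem.List.pyRange a (b + 1) 1).foldl
    (fun answer i =>
      let cnt := pvCntDivs i
      if cnt ≤ 2 then
        if PySem.Int.mod (PySem.Int.floordiv i 10 + PySem.Int.mod i 10) 2 = 0 then answer + 1
        else answer
      else answer) 0

-- ===== PORT B =====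
-- B's while loop: j = 2; while j*j <= i: if i % j == 0: keep = False; break; j += 1
def pvTrial (i : Int) (j : Nat) : Bool :=
  if h : (j : Int) * (j : Int) ≤ i then
    (if PySem.Int.mod i (j : Int) = 0 then false else pvTrial i (j + 1))
  else true
termination_by i.toNat + 1 - j
decreasing_by
  have hj : (j : Int) ≤ i := by nlinarith
  omega

def primeAndSum_alt (a : Int) (b : Int) : Int :=
  (PySem.List.pyRange a (b + 1) 1).foldl
    (fun answer i =>
      let keep : Bool := if 2 ≤ i then pvTrial i 2 else true
      if keep && decide (PySem.Int.mod (PySem.Int.floordiv i 10 + PySem.Int.mod i 10) 2 = 0)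
      then answer + 1 else answer) 0

-- ===== PRECONDITION & SPEC =====
def Spec_primeAndSum (a : Int) (b : Int) (out : Int) : Prop := out = primeAndSum_alt a b
instance (a : Int) (b : Int) (out : Int) : Decidable (Spec_primeAndSum a b out) := by unfold Spec_primeAndSum; infer_instance

-- ===== CLAIM (what is proved, stated in full; the proofs are below) =====
def Claim_equal_primeAndSum : Prop := ∀ (a : Int) (b : Int), Dom_primeAndSum a b → Spec_primeAndSum a b (primeAndSum a b)

-- ===== LEMMAS AND PROOFS =====

-- B's trial loop succeeds iff no m ≥ j with m*m ≤ i divides i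
theorem pvTrial_iff (i : Int) (j : Nat) :
    pvTrial i j = true ↔ ∀ m : Nat, j ≤ m → (m : Int) * (m : Int) ≤ i → ¬ ((m : Int) ∣ i) := by
  fun_induction pvTrial i j with
  | case1 x y z =>
    have hdvd : (x : Int) ∣ i := (PySem.Int.mod_eq_zero_iff_dvd i x).mp z
    simp only [Bool.false_eq_true, false_iff]
    intro h
    exact h x le_rfl y hdvd
  | case2 x y z w =>
    rw [w]
    constructor
    · intro h m hm hsq
      rcases Nat.lt_or_ge x m with hlt | hge
      · exact h m hlt hsq
      · have : m = x := le_antisymm hge hm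
        subst this
        intro hdvd
        exact z ((PySem.Int.mod_eq_zero_iff_dvd i m).mpr hdvd)
    · intro h m hm hsq
      exact h m (Nat.le_of_succ_le hm) hsq
  | case3 x y =>
    simp only [true_iff]
    intro m hm hsq hdvd
    apply y
    calc ((x:Int)) * x ≤ (m:Int) * m := by
          have : (x:Int) ≤ m := by exact_mod_cast hm
          have hx : (0:Int) ≤ x := Int.natCast_nonneg x
          nlinarith
      _ ≤ i := hsq

-- A's divisor count as a countP over List.range
theorem pvCntDivs_eq (n : Nat) :
    pvCntDivs (n : Int) = ((List.range n).countP (fun k => decide ((k + 1) ∣ n)) : Int) := by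
  unfold pvCntDivs
  rw [PySem.List.pyRange_one]
  have h1 : ((n : Int) + 1 - 1).toNat = n := by omega
  rw [h1, List.foldl_map]
  have hfc := PySem.List.foldl_count_if (fun k : Nat => decide (PySem.Int.mod (n:Int) (1 + (k:Int)) = 0)) (List.range n) 0
  simp only [decide_eq_true_eq] at hfc
  rw [hfc, List.countP_congr]
  · ring
  · intro k _
    simp only [decide_eq_true_eq]
    rw [PySem.Int.mod_eq_zero_iff_dvd]
    constructor
    · intro h
      have h3 : ((1 + k : Nat) : Int) ∣ (n:Int) := by push_cast; exact h
      simpa [Nat.add_comm] using Int.natCast_dvd_natCast.mp h3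
    · intro h
      have h2 : ((k+1 : Nat) : Int) ∣ (n:Int) := by exact_mod_cast h
      convert h2 using 2
      push_cast
      ring

-- cnt ≤ 2 means: no divisor strictly between 1 and n
theorem count_le_two_iff (n : Nat) (hn : 2 ≤ n) :
    ((List.range n).countP (fun k => decide ((k + 1) ∣ n)) ≤ 2) ↔
      ∀ m : Nat, 2 ≤ m → m < n → ¬ m ∣ n := by
  obtain ⟨w, rfl⟩ : ∃ w, n = w + 2 := ⟨n - 2, by omega⟩
  set p : Nat → Bool := fun k => decide ((k + 1) ∣ (w+2)) with hp
  have hr : List.range (w+2) = (0 :: (List.range w).map Nat.succ) ++ [w+1] := by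
    rw [← List.range_succ_eq_map, ← List.range_succ]
  rw [hr, List.countP_append, List.countP_cons, List.countP_map]
  have hp0 : p 0 = true := by simp [hp]
  have hpl : p (w+1) = true := by simp [hp]
  simp only [List.countP_singleton, hp0, hpl, if_pos]
  constructor
  · intro h m hm2 hmn hdvd
    have hpos : 0 < List.countP (p ∘ Nat.succ) (List.range w) := by
      apply List.countP_pos_iff.mpr
      refine ⟨m - 2, List.mem_range.mpr (by omega), ?_⟩
      simp only [Function.comp, hp, decide_eq_true_eq, Nat.succ_eq_add_one]
      have hm : m - 2 + 1 + 1 = m := by omega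
      rw [hm]; exact hdvd
    omega
  · intro h
    have hz : List.countP (p ∘ Nat.succ) (List.range w) = 0 := by
      apply List.countP_eq_zero.mpr
      intro k hk
      simp only [Function.comp, hp, decide_eq_true_eq, Nat.succ_eq_add_one]
      exact h (k+1+1) (by omega) (by have := List.mem_range.mp hk; omega)
    omega

-- pointwise agreement of A's keep-condition (cnt ≤ 2) and B's (trial division)
theorem keep_iff (i : Int) :
    (pvCntDivs i ≤ 2) ↔ ((if 2 ≤ i then pvTrial i 2 else true) = true) := by
  by_cases h2 : 2 ≤ i
  · rw [if_pos h2]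
    have hni : ((i.toNat : Nat) : Int) = i := by omega
    have hn2 : 2 ≤ i.toNat := by omega
    rw [← hni, pvCntDivs_eq, pvTrial_iff]
    set n := i.toNat with hn
    have hc : (((List.range n).countP (fun k => decide ((k + 1) ∣ n)) : Int) ≤ 2) ↔
        ((List.range n).countP (fun k => decide ((k + 1) ∣ n)) ≤ 2) := by exact_mod_cast Iff.rfl
    rw [hc, count_le_two_iff n hn2]
    constructor
    · intro h m hm hsq hdvd
      have hprime : n.Prime := Nat.prime_def_lt'.mpr ⟨hn2, h⟩
      have hmm : m * m ≤ n := by exact_mod_cast hsq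
      exact (Nat.prime_def_le_sqrt.mp hprime).2 m hm (Nat.le_sqrt.mpr hmm)
        (Int.natCast_dvd_natCast.mp hdvd)
    · intro h
      have hprime : n.Prime := Nat.prime_def_le_sqrt.mpr
        ⟨hn2, fun m hm hs hd => h m hm (by exact_mod_cast Nat.le_sqrt.mp hs)
          (Int.natCast_dvd_natCast.mpr hd)⟩
      exact (Nat.prime_def_lt'.mp hprime).2
  · rw [if_neg h2]
    refine iff_of_true ?_ rfl
    by_cases h0 : i ≤ 0
    · unfold pvCntDivs
      rw [PySem.List.pyRange_one_eq_nil (by omega)]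
      simp
    · have : i = 1 := by omega
      subst this
      decide

-- ===== VERDICT (by name: the statement is the Claim_ definition above) =====
theorem primeAndSum_spec : Claim_equal_primeAndSum := by
  intro a b _
  unfold Spec_primeAndSum primeAndSum primeAndSum_alt
  congr 1
  funext answer i
  dsimp only
  have hk := keep_iff i
  by_cases hc : pvCntDivs i ≤ 2
  · have hkeep : (if 2 ≤ i then pvTrial i 2 else true) = true := hk.mp hc
    rw [if_pos hc, hkeep]
    by_cases hd : PySem.Int.mod (PySem.Int.floordiv i 10 + PySem.Int.mod i 10) 2 = 0
    · rw [if_pos hd, decide_eq_true hd]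
      rfl
    · rw [if_neg hd, decide_eq_false hd]
      rfl
  · have hkeep : (if 2 ≤ i then pvTrial i 2 else true) = false := by
      cases hkk : (if 2 ≤ i then pvTrial i 2 else true) with
      | false => rfl
      | true => exact absurd (hk.mpr hkk) hc
    rw [if_neg hc, hkeep]
    simp
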